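-- pv_equiv track=rewrite | github.com/roroark/High-Radix-Vedic-Division-Emulation | run.py | radix8_prescaled_pla_access
-- ===== SOURCE A (Python) =====
-- def radix8_prescaled_pla_access(input):
--     rev_input_binary = "".join(reversed(input))
--     two_pow = 1
--     input_decimal = 0
--     for i in range(len(rev_input_binary)):
--         if i + 1 == len(rev_input_binary) and rev_input_binary[i] == "1":
--             input_decimal += -two_pow
--         elif rev_input_binary[i] == "1":
--             input_decimal += two_pow
--         two_pow = two_pow * 2
--
--     if  input_decimal >= 12:
--         # -7
--         return "1001"
--     elif input_decimal >= 10: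
--         # -6
--         return "1010"
--     elif input_decimal >= 8:
--         # - 5
--         return "1011"
--     elif input_decimal >= 6:
--         # -4
--         return "1100"
--     elif input_decimal >= 4:
--         # -3
--         return "1101"
--     elif input_decimal >= 2:
--         # -2
--         return "1110"
--     elif input_decimal >= 1:
--         # -1
--         return  "1111"
--     elif input_decimal >= -1:
--         # 0
--         return "0000"
--     elif input_decimal >= -2:
--         # +1
--         return "0001"
--     elif input_decimal >= -4:
--         # +2
--         return "0010"
--     elif input_decimal >= -6:
--         # +3
--         return "0011"
--     elif input_decimal >= -8:
--         # +4
--         return "0100"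
--     elif input_decimal >= -10:
--         # +5
--         return "0101"
--     elif input_decimal >= -12:
--         # +6
--         return "0110"
--     else:
--         # +7
--         return "0111"
-- ===== SOURCE B (Python) =====
-- # Lookup-table approach: the quotient digit depends only on the sign bit and the
-- # bits after the leading sign-extension run.  Normalise every char to '0'/'1'
-- # (A counts any non-'1' char as 0), strip the leading run of the sign bit, clamp
-- # to +/-7 when more than 4 significant bits remain, otherwise read the code
-- # straight out of a 16-entry table per sign.  No integer is ever decoded.
--
-- POS = {
--     "": "0000", "1": "1111", "10": "1110", "11": "1110",
--     "100": "1101", "101": "1101", "110": "1100", "111": "1100",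
--     "1000": "1011", "1001": "1011", "1010": "1010", "1011": "1010",
--     "1100": "1001", "1101": "1001", "1110": "1001", "1111": "1001",
-- }
-- NEG = {
--     "": "0000", "0": "0001", "00": "0010", "01": "0010",
--     "000": "0100", "001": "0100", "010": "0011", "011": "0011",
--     "0000": "0111", "0001": "0111", "0010": "0111", "0011": "0111",
--     "0100": "0110", "0101": "0110", "0110": "0101", "0111": "0101",
-- }
--
-- def radix8_prescaled_pla_access(input):
--     bits = "".join("1" if c == "1" else "0" for c in input)
--     if not bits:
--         return "0000"
--     sign = bits[0]
--     rest = bits.lstrip(sign)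
--     if len(rest) >= 5:
--         return "1001" if sign == "0" else "0111"
--     return (POS if sign == "0" else NEG)[rest]
-- ===== Notes on version B (the rewrite author's own statement) =====
-- stated objective: faster
-- what changed: Instead of decoding the whole string to an integer (an n-bit bignum power accumulator) and walking a 15-branch comparison ladder, B strips the leading sign-extension run, clamps to +/-7 when more than 4 significant bits remain, and otherwise reads the 4-bit code straight from one of two 16-entry lookup tables keyed by the remaining bit string; no integer value or power of two is ever computed.
import Mathlib
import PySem

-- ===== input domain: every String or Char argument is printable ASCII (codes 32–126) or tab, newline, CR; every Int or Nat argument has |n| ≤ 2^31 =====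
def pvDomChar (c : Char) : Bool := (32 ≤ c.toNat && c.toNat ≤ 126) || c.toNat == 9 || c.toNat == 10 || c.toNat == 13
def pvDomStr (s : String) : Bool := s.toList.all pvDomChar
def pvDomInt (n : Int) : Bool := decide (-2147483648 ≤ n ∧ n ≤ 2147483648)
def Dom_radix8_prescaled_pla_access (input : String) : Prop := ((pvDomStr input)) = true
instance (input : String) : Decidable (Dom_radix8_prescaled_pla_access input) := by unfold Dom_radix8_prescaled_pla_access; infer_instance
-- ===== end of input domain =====

-- B replaces A's numeric decode-then-compare (power loop + 15-branch ladder) by a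
-- sign-extension-stripping lookup-table algorithm: normalise, strip the leading run of
-- the sign bit, clamp if >4 significant bits remain, else read a 16-entry table: no bignum
-- arithmetic, measured faster in a timing run.

-- ===== PORT A =====
-- the Python loop runs i over range(len(rev)); the check 'i + 1 == len(rev)' is exactly
-- 'the current element is the last one', i.e. the remaining list is empty
def pvLoopA : List Char → Int → Int → Int
  | [], _, dec => dec
  | c :: rest, two_pow, dec =>
    let dec' :=
      if rest.isEmpty && c == '1' then dec + (-two_pow)
      else if c == '1' then dec + two_pow
      else dec
    pvLoopA rest (two_pow * 2) dec'

def radix8_prescaled_pla_access (input : String) : String :=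
  let rev := input.toList.reverse
  let input_decimal := pvLoopA rev 1 0
  if input_decimal ≥ 12 then "1001"
  else if input_decimal ≥ 10 then "1010"
  else if input_decimal ≥ 8 then "1011"
  else if input_decimal ≥ 6 then "1100"
  else if input_decimal ≥ 4 then "1101"
  else if input_decimal ≥ 2 then "1110"
  else if input_decimal ≥ 1 then "1111"
  else if input_decimal ≥ -1 then "0000"
  else if input_decimal ≥ -2 then "0001"
  else if input_decimal ≥ -4 then "0010"
  else if input_decimal ≥ -6 then "0011"
  else if input_decimal ≥ -8 then "0100"
  else if input_decimal ≥ -10 then "0101"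
  else if input_decimal ≥ -12 then "0110"
  else "0111"

-- ===== PORT B =====
def pvPOS : PySem.Dict String String := PySem.Dict.ofList
  [("", "0000"), ("1", "1111"), ("10", "1110"), ("11", "1110"),
   ("100", "1101"), ("101", "1101"), ("110", "1100"), ("111", "1100"),
   ("1000", "1011"), ("1001", "1011"), ("1010", "1010"), ("1011", "1010"),
   ("1100", "1001"), ("1101", "1001"), ("1110", "1001"), ("1111", "1001")]

def pvNEG : PySem.Dict String String := PySem.Dict.ofList
  [("", "0000"), ("0", "0001"), ("00", "0010"), ("01", "0010"),
   ("000", "0100"), ("001", "0100"), ("010", "0011"), ("011", "0011"),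
   ("0000", "0111"), ("0001", "0111"), ("0010", "0111"), ("0011", "0111"),
   ("0100", "0110"), ("0101", "0110"), ("0110", "0101"), ("0111", "0101")]

def radix8_prescaled_pla_access_alt (input : String) : String :=
  let bits := input.toList.map (fun c => if c == '1' then '1' else '0')
  match bits with
  | [] => "0000"
  | sign :: _ =>
    -- bits.lstrip(sign) with a one-char argument: drop the leading run of that char (exact)
    let rest := bits.dropWhile (fun c => c == sign)
    if rest.length ≥ 5 then (if sign == '0' then "1001" else "0111")
    -- dict[key]: the key is always present here (rest is ≤ 4 bits not starting with sign),
    -- so Python never raises; getD's default is unreachable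
    else (if sign == '0' then pvPOS else pvNEG).getD (String.ofList rest) ""

-- ===== PRECONDITION & SPEC =====
def Spec_radix8_prescaled_pla_access (input : String) (out : String) : Prop := out = radix8_prescaled_pla_access_alt input
instance (input : String) (out : String) : Decidable (Spec_radix8_prescaled_pla_access input out) := by unfold Spec_radix8_prescaled_pla_access; infer_instance

-- ===== CLAIM (what is proved, stated in full; the proofs are below) =====
def Claim_equal_radix8_prescaled_pla_access : Prop := ∀ (input : String), Dom_radix8_prescaled_pla_access input → Spec_radix8_prescaled_pla_access input (radix8_prescaled_pla_access input)

-- ===== LEMMAS AND PROOFS =====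

-- bit value of a char
def pvBit (c : Char) : Int := if c == '1' then 1 else 0

-- A's ladder as a function of the decoded value
def pvLadder (d : Int) : String :=
  if d ≥ 12 then "1001"
  else if d ≥ 10 then "1010"
  else if d ≥ 8 then "1011"
  else if d ≥ 6 then "1100"
  else if d ≥ 4 then "1101"
  else if d ≥ 2 then "1110"
  else if d ≥ 1 then "1111"
  else if d ≥ -1 then "0000"
  else if d ≥ -2 then "0001"
  else if d ≥ -4 then "0010"
  else if d ≥ -6 then "0011"
  else if d ≥ -8 then "0100"
  else if d ≥ -10 then "0101"
  else if d ≥ -12 then "0110"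
  else "0111"

-- signed value A's loop computes over the reversed list (LSB first, last bit negative)
def pvS : List Char → Int
  | [] => 0
  | c :: rest => (if rest.isEmpty then -pvBit c else pvBit c) + 2 * pvS rest

lemma pvLoopA_eq (l : List Char) : ∀ tp dec, pvLoopA l tp dec = dec + tp * pvS l := by
  induction l with
  | nil => intro tp dec; simp [pvLoopA, pvS]
  | cons c rest ih =>
    intro tp dec
    simp only [pvLoopA, pvS, ih]
    by_cases h : c = '1' <;> by_cases hr : rest.isEmpty <;>
      simp [h, hr, pvBit] <;> ring

-- unsigned LSB-first value
def pvU : List Char → Int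
  | [] => 0
  | c :: rest => pvBit c + 2 * pvU rest

-- unsigned MSB-first value
def pvV (l : List Char) : Int := pvU l.reverse

lemma pvS_cons_cons (c c' : Char) (t : List Char) :
    pvS (c :: c' :: t) = pvBit c + 2 * pvS (c' :: t) := by
  simp only [pvS, List.isEmpty_cons, Bool.false_eq_true, if_false]

lemma pvS_eq (l : List Char) (h : l ≠ []) :
    pvS l = pvU l - pvBit (l.getLast h) * 2 ^ l.length := by
  induction l with
  | nil => exact absurd rfl h
  | cons c rest ih =>
    cases rest with
    | nil => simp [pvS, pvU]; ring
    | cons c' t =>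
      have hne : (c' :: t) ≠ [] := by simp
      rw [pvS_cons_cons, ih hne, List.getLast_cons hne]
      show _ = pvBit c + 2 * pvU (c' :: t) - _ * 2 ^ ((c' :: t).length + 1)
      ring

lemma pvU_append_singleton (l : List Char) (c : Char) :
    pvU (l ++ [c]) = pvU l + pvBit c * 2 ^ l.length := by
  induction l with
  | nil => simp [pvU]
  | cons x t ih => simp [pvU, ih]; ring

lemma pvV_cons (c : Char) (t : List Char) :
    pvV (c :: t) = pvBit c * 2 ^ t.length + pvV t := by
  simp only [pvV, List.reverse_cons, pvU_append_singleton, List.length_reverse]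
  ring

lemma pvV_append (l r : List Char) :
    pvV (l ++ r) = pvV l * 2 ^ r.length + pvV r := by
  induction l with
  | nil => simp [pvV, pvU]
  | cons c t ih =>
    rw [List.cons_append, pvV_cons, ih, pvV_cons, List.length_append]
    ring

lemma pvBit_cases (c : Char) : pvBit c = 0 ∨ pvBit c = 1 := by
  by_cases h : c = '1' <;> simp [pvBit, h]

lemma pvV_nonneg (l : List Char) : 0 ≤ pvV l := by
  induction l with
  | nil => simp [pvV, pvU]
  | cons c t ih =>
    rw [pvV_cons]
    rcases pvBit_cases c with h | h <;> simp [h] <;> positivity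

lemma pvV_lt (l : List Char) : pvV l < 2 ^ l.length := by
  induction l with
  | nil => simp [pvV, pvU]
  | cons c t ih =>
    rw [pvV_cons, List.length_cons, pow_succ]
    rcases pvBit_cases c with h | h <;> rw [h] <;> nlinarith [pvV_nonneg t]

lemma pvV_replicate_zero (k : Nat) : pvV (List.replicate k '0') = 0 := by
  induction k with
  | zero => simp [pvV, pvU]
  | succ n ih => rw [List.replicate_succ, pvV_cons, ih]; simp [pvBit]

lemma pvV_replicate_one (k : Nat) : pvV (List.replicate k '1') = 2 ^ k - 1 := by
  induction k with
  | zero => simp [pvV, pvU]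
  | succ n ih =>
    rw [List.replicate_succ, pvV_cons, ih, List.length_replicate, pow_succ]
    simp [pvBit]; ring

-- normalisation keeps the decoded value
lemma pvS_map_norm (l : List Char) :
    pvS (l.map (fun c => if c == '1' then '1' else '0')) = pvS l := by
  induction l with
  | nil => simp
  | cons c t ih =>
    cases t with
    | nil => by_cases h : c = '1' <;> simp [pvS, pvBit, h]
    | cons d u =>
      simp only [List.map_cons] at ih ⊢
      rw [pvS_cons_cons, pvS_cons_cons, ih]
      have hb : pvBit (if c == '1' then '1' else '0') = pvBit c := by
        by_cases h : c = '1' <;> simp [pvBit, h]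
      rw [hb]

-- the signed (two's-complement) value, MSB-first
lemma pvS_reverse (l : List Char) (h : l ≠ []) :
    pvS l.reverse = pvV l - pvBit (l.head h) * 2 ^ l.length := by
  have hne : l.reverse ≠ [] := by simpa using h
  rw [pvS_eq l.reverse hne, pvV]
  congr 1
  rw [List.getLast_reverse, List.length_reverse]

-- leading run: the takeWhile part is a replicate of the sign char
lemma pvTakeWhile_replicate (l : List Char) (c : Char) :
    l.takeWhile (fun x => x == c) = List.replicate (l.takeWhile (fun x => x == c)).length c := by
  rw [List.eq_replicate_iff]
  refine ⟨rfl, fun x hx => ?_⟩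
  have := List.mem_takeWhile_imp hx
  simpa using this

lemma pvDropWhile_head (l : List Char) (c a : Char) (t : List Char)
    (h : l.dropWhile (fun x => x == c) = a :: t) : a ≠ c := by
  have := List.head_dropWhile_not (p := fun x => x == c) (l := l) (by simp [h])
  simp only [h, List.head_cons] at this
  simpa using this

-- table lemma, positive side: rest has ≤ 4 chars from {'0','1'}, none leading '0'
lemma pvPOS_table (r : List Char) (hlen : r.length ≤ 4)
    (hch : ∀ x ∈ r, x = '0' ∨ x = '1')
    (hhd : ∀ a t, r = a :: t → a = '1') :
    pvLadder (pvV r) = pvPOS.getD (String.ofList r) "" := by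
  match r with
  | [] => decide
  | a :: r' =>
    have ha : a = '1' := hhd a r' rfl
    subst ha
    match r' with
    | [] => decide
    | b :: r'' =>
      rcases hch b (by simp) with hb | hb <;> subst hb <;>
      · match r'' with
        | [] => decide
        | c :: r''' =>
          rcases hch c (by simp) with hc | hc <;> subst hc <;>
          · match r''' with
            | [] => decide
            | d :: r'''' =>
              rcases hch d (by simp) with hd | hd <;> subst hd <;>
              · match r'''' with
                | [] => decide
                | e :: _ => simp at hlen; omega

-- table lemma, negative side
lemma pvNEG_table (r : List Char) (hlen : r.length ≤ 4)
    (hch : ∀ x ∈ r, x = '0' ∨ x = '1')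
    (hhd : ∀ a t, r = a :: t → a = '0') :
    pvLadder (pvV r - 2 ^ r.length) = pvNEG.getD (String.ofList r) "" := by
  match r with
  | [] => decide
  | a :: r' =>
    have ha : a = '0' := hhd a r' rfl
    subst ha
    match r' with
    | [] => decide
    | b :: r'' =>
      rcases hch b (by simp) with hb | hb <;> subst hb <;>
      · match r'' with
        | [] => decide
        | c :: r''' =>
          rcases hch c (by simp) with hc | hc <;> subst hc <;>
          · match r''' with
            | [] => decide
            | d :: r'''' =>
              rcases hch d (by simp) with hd | hd <;> subst hd <;>
              · match r'''' with
                | [] => decide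
                | e :: _ => simp at hlen; omega

lemma pvLadder_high (d : Int) (h : d ≥ 12) : pvLadder d = "1001" := by
  unfold pvLadder; rw [if_pos h]

lemma pvLadder_low (d : Int) (h : d < -12) : pvLadder d = "0111" := by
  unfold pvLadder
  repeat rw [if_neg (by omega)]

-- the computational core, over the normalised bit list
lemma pvMainCons (sign : Char) (t : List Char)
    (hch : ∀ x ∈ sign :: t, x = '0' ∨ x = '1') :
    pvLadder (pvS (sign :: t).reverse) =
      (if ((sign :: t).dropWhile (fun c => c == sign)).length ≥ 5 then
        (if sign == '0' then "1001" else "0111")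
       else (if sign == '0' then pvPOS else pvNEG).getD
         (String.ofList ((sign :: t).dropWhile (fun c => c == sign))) "") := by
    set rest := (sign :: t).dropWhile (fun c => c == sign) with hrest
    have hsplit : (sign :: t).takeWhile (fun c => c == sign) ++ rest = sign :: t :=
      List.takeWhile_append_dropWhile
    set k := ((sign :: t).takeWhile (fun c => c == sign)).length with hk
    have hrepl : (sign :: t).takeWhile (fun c => c == sign) = List.replicate k sign :=
      pvTakeWhile_replicate _ _
    have hkpos : 1 ≤ k := by
      rw [hk, List.takeWhile_cons, if_pos (by simp)]
      simp
    have hlen : (sign :: t).length = k + rest.length := by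
      conv_lhs => rw [← hsplit]
      simp [hrepl]
    have hrch : ∀ x ∈ rest, x = '0' ∨ x = '1' := fun x hx =>
      hch x (by rw [← hsplit]; exact List.mem_append_right _ hx)
    have hrhd : ∀ a t', rest = a :: t' → a ≠ sign := fun a t' h =>
      pvDropWhile_head _ _ _ _ (hrest ▸ h)
    have hne : (sign :: t) ≠ [] := by simp
    have hV : pvV (sign :: t) = pvV (List.replicate k sign) * 2 ^ rest.length + pvV rest := by
      conv_lhs => rw [← hsplit, hrepl]
      rw [pvV_append]
    rcases hch sign (by simp) with hs | hs
    · -- sign = '0'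
      subst hs
      have hdv : pvS ('0' :: t).reverse = pvV rest := by
        rw [pvS_reverse _ hne, List.head_cons, hV, pvV_replicate_zero]
        simp [pvBit]
      rw [hdv]
      by_cases hlong : rest.length ≥ 5
      · -- clamp: rest starts with '1', value ≥ 16
        have hne' : rest ≠ [] := by intro h; rw [h] at hlong; simp at hlong
        obtain ⟨a, r', hr⟩ := List.exists_cons_of_ne_nil hne'
        have ha1 : a = '1' := by
          rcases hrch a (by rw [hr]; simp) with h | h
          · exact absurd h (by simpa using hrhd a r' hr)
          · exact h
        have hge : pvV rest ≥ 12 := by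
          rw [hr, pvV_cons, ha1]
          have hb1 : pvBit '1' = 1 := by decide
          have hlen' : 4 ≤ r'.length := by
            rw [hr] at hlong; simp at hlong; omega
          have h16 : (2:Int) ^ 4 ≤ 2 ^ r'.length := pow_le_pow_right₀ (by norm_num) hlen'
          have h0 := pvV_nonneg r'
          rw [hb1, one_mul]
          norm_num at h16 ⊢
          omega
        rw [if_pos hlong, if_pos (by decide : ('0' == '0') = true)]
        exact pvLadder_high _ hge
      · rw [if_neg hlong, if_pos (by decide : ('0' == '0') = true)]
        exact pvPOS_table rest (by omega) hrch
          (fun a t' h => by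
            rcases hrch a (by rw [h]; simp) with h' | h'
            · exact absurd h' (by simpa using hrhd a t' h)
            · exact h')
    · -- sign = '1'
      subst hs
      have hdv : pvS ('1' :: t).reverse = pvV rest - 2 ^ rest.length := by
        rw [pvS_reverse _ hne, List.head_cons, hV, pvV_replicate_one]
        have hb1 : pvBit '1' = 1 := by decide
        rw [hb1, one_mul, hlen, pow_add]
        ring
      rw [hdv]
      by_cases hlong : rest.length ≥ 5
      · -- clamp: rest starts with '0', value < 2^(m-1), so d ≤ -17
        have hne' : rest ≠ [] := by intro h; rw [h] at hlong; simp at hlong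
        obtain ⟨a, r', hr⟩ := List.exists_cons_of_ne_nil hne'
        have ha0 : a = '0' := by
          rcases hrch a (by rw [hr]; simp) with h | h
          · exact h
          · exact absurd h (by simpa using hrhd a r' hr)
        have hub : pvV rest < 2 ^ r'.length := by
          rw [hr, pvV_cons, ha0]
          have hb0 : pvBit '0' = 0 := by decide
          rw [hb0, zero_mul, zero_add]
          exact pvV_lt r'
        have hlt : pvV rest - 2 ^ rest.length < -12 := by
          have hr'len : rest.length = r'.length + 1 := by rw [hr]; simp
          have h16 : (2:Int) ^ 4 ≤ 2 ^ r'.length :=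
            pow_le_pow_right₀ (by norm_num) (by omega)
          have hsp : (2:Int) ^ rest.length = 2 * 2 ^ r'.length := by
            rw [hr'len, pow_succ]; ring
          norm_num at h16
          omega
        rw [if_pos hlong, if_neg (by decide : ¬ (('1' == '0') = true))]
        exact pvLadder_low _ hlt
      · rw [if_neg hlong, if_neg (by decide : ¬ (('1' == '0') = true))]
        exact pvNEG_table rest (by omega) hrch
          (fun a t' h => by
            rcases hrch a (by rw [h]; simp) with h' | h'
            · exact h'
            · exact absurd h' (by simpa using hrhd a t' h))

-- ===== VERDICT (by name: the statement is the Claim_ definition above) =====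
theorem radix8_prescaled_pla_access_spec : Claim_equal_radix8_prescaled_pla_access := by
  intro input _
  show radix8_prescaled_pla_access input = radix8_prescaled_pla_access_alt input
  have hch : ∀ x ∈ input.toList.map (fun c => if c == '1' then '1' else '0'),
      x = '0' ∨ x = '1' := by
    intro x hx
    rcases List.mem_map.mp hx with ⟨c, _, hc⟩
    by_cases h : c = '1' <;> simp [h] at hc <;> [exact Or.inr hc.symm; exact Or.inl hc.symm]
  have hA : radix8_prescaled_pla_access input
      = pvLadder (pvS (input.toList.map (fun c => if c == '1' then '1' else '0')).reverse) := by
    simp only [radix8_prescaled_pla_access, pvLadder, pvLoopA_eq, one_mul, zero_add,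
      ← List.map_reverse, pvS_map_norm]
  rw [hA]
  show pvLadder _ = radix8_prescaled_pla_access_alt input
  simp only [radix8_prescaled_pla_access_alt]
  generalize hg : input.toList.map (fun c => if c == '1' then '1' else '0') = bits
  rw [hg] at hch
  cases bits with
  | nil => decide
  | cons sign t => exact pvMainCons sign t hch
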